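-- pv_equiv track=rewrite | github.com/demianmedich/SSD | src/ssd/driver/buffer.py | _split_erase_commands
-- ===== SOURCE A (Python) =====
-- def _split_erase_commands(cand: list):
--     cmds = []
--     if not cand:
--         return cmds
--     if len(cand) == 1:
--         cmds = f"E {cand[0]} 1"
--         return cmds
--
--     i = 0
--     for j in range(i + 1, len(cand)):
--         if cand[j] - cand[j - 1] > 1:
--             size = cand[j - 1] - cand[i] + 1
--             cmds.append(f"E {cand[i]} {size}")
--             i = j
--
--     size = cand[-1] - cand[i] + 1
--     cmds.append(f"E {cand[i]} {size}")
--
--     return cmds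
-- ===== SOURCE B (Python) =====
-- def _split_erase_commands(cand: list):
--     # Staged passes: first compute all run-boundary indices ("cuts"), then
--     # render one command per consecutive pair of cuts.
--     if not cand:
--         return []
--     n = len(cand)
--     cuts = [0] + [k for k in range(1, n) if cand[k] - cand[k - 1] > 1] + [n]
--     return [f"E {cand[a]} {cand[b - 1] - cand[a] + 1}" for a, b in zip(cuts, cuts[1:])]
-- ===== Notes on version B (the rewrite author's own statement) =====
-- stated objective: alternative
-- what changed: Replaces A's single accumulator loop (saved start index i, emit-on-gap, trailing append) with two staged passes: first a comprehension collecting all run-boundary indices ('cuts'), then a comprehension rendering one command per consecutive pair of cuts via zip.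
-- outside the precondition, e.g. on _split_erase_commands([5]): A returns 'E 5 1', B returns ['E 5 1']
import Mathlib
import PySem

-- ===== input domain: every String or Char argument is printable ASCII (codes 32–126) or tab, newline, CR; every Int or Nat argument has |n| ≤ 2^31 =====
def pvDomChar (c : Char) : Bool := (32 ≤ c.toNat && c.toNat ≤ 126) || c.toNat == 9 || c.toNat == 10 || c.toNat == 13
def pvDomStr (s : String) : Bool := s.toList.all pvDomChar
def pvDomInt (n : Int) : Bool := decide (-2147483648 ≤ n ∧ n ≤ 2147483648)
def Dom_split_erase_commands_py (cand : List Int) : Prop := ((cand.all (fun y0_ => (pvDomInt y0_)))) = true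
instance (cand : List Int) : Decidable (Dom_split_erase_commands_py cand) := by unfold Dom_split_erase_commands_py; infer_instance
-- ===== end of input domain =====

-- B replaces A's accumulator gap loop with two staged passes (collect boundary indices, then render pairs); objective: alternative.


-- ===== PORT A =====
-- loop body of A's 'for j in range(i+1, len(cand))' with state (i, cmds)
def pvStepA (cand : List Int) (st : Int × List String) (j : Int) : Int × List String :=
  if PySem.List.pyGetD cand j 0 - PySem.List.pyGetD cand (j - 1) 0 > 1 then
    (j, st.2 ++ ["E " ++ PySem.Int.toStr (PySem.List.pyGetD cand st.1 0) ++ " " ++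
                 PySem.Int.toStr (PySem.List.pyGetD cand (j - 1) 0 - PySem.List.pyGetD cand st.1 0 + 1)])
  else st

def split_erase_commands_py (cand : List Int) : List String :=
  if cand = [] then []
  else if cand.length = 1 then
    -- Python returns the bare string "E {cand[0]} 1" here (not a list); outside Pre_
    ["E " ++ PySem.Int.toStr (PySem.List.pyGetD cand 0 0) ++ " 1"]
  else
    let st := (PySem.List.pyRange 1 (cand.length : Int) 1).foldl (pvStepA cand) (0, [])
    st.2 ++ ["E " ++ PySem.Int.toStr (PySem.List.pyGetD cand st.1 0) ++ " " ++
             PySem.Int.toStr (PySem.List.pyGetD cand (-1) 0 - PySem.List.pyGetD cand st.1 0 + 1)]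

-- ===== PORT B =====
-- the f-string of B's second comprehension, for a pair (a, b) of consecutive cuts
def pvCmd (cand : List Int) (p : Int × Int) : String :=
  "E " ++ PySem.Int.toStr (PySem.List.pyGetD cand p.1 0) ++ " " ++
  PySem.Int.toStr (PySem.List.pyGetD cand (p.2 - 1) 0 - PySem.List.pyGetD cand p.1 0 + 1)

def split_erase_commands_py_alt (cand : List Int) : List String :=
  if cand = [] then []
  else
    let n : Int := (cand.length : Int)
    let cuts : List Int :=
      [0] ++ (PySem.List.pyRange 1 n 1).filter
        (fun k => decide (PySem.List.pyGetD cand k 0 - PySem.List.pyGetD cand (k - 1) 0 > 1)) ++ [n]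
    (cuts.zip cuts.tail).map (pvCmd cand)

-- ===== PRECONDITION & SPEC =====
-- Pre_ excludes exactly the length-1 lists, on which Python A returns a bare str "E {cand[0]} 1"
-- instead of a list — a value outside the declared return type List String.
def Pre_split_erase_commands_py (cand : List Int) : Prop := cand.length ≠ 1
instance (cand : List Int) : Decidable (Pre_split_erase_commands_py cand) := by
  unfold Pre_split_erase_commands_py; infer_instance
def pvWitness_split_erase_commands_py : List Int := [1, 2, 5]

def Spec_split_erase_commands_py (cand : List Int) (out : List String) : Prop := out = split_erase_commands_py_alt cand
instance (cand : List Int) (out : List String) : Decidable (Spec_split_erase_commands_py cand out) := by unfold Spec_split_erase_commands_py; infer_instance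

-- ===== CLAIM (what is proved, stated in full; the proofs are below) =====
def Claim_equal_split_erase_commands_py : Prop := ∀ (cand : List Int), Dom_split_erase_commands_py cand → Pre_split_erase_commands_py cand → Spec_split_erase_commands_py cand (split_erase_commands_py cand)

-- ===== LEMMAS AND PROOFS =====

-- Invariant tying A's index fold to B's cuts: from index j with saved start index i,
-- A's remaining fold plus its final append equals cmds ++ the rendering of the
-- consecutive pairs of the cut list (i :: gaps from j onwards ++ [n]).
lemma pvFold_eq (cand : List Int) (fuel : Nat) (i j : Int) (cmds : List String)
    (hi0 : 0 ≤ i) (hij : i ≤ j - 1) (hj1 : 1 ≤ j) (hjn : j ≤ (cand.length : Int))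
    (hfuel : fuel = ((cand.length : Int) - j).toNat) :
    (let st := (PySem.List.pyRange j (cand.length : Int) 1).foldl (pvStepA cand) (i, cmds)
     st.2 ++ ["E " ++ PySem.Int.toStr (PySem.List.pyGetD cand st.1 0) ++ " " ++
              PySem.Int.toStr (PySem.List.pyGetD cand (-1) 0 - PySem.List.pyGetD cand st.1 0 + 1)])
    = cmds ++
      (let cuts : List Int := i :: (PySem.List.pyRange j (cand.length : Int) 1).filter
          (fun k => decide (PySem.List.pyGetD cand k 0 - PySem.List.pyGetD cand (k - 1) 0 > 1))
        ++ [(cand.length : Int)]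
       (cuts.zip cuts.tail).map (pvCmd cand)) := by
  induction fuel generalizing i j cmds with
  | zero =>
    have hj : j = (cand.length : Int) := by omega
    subst hj
    have hne : cand ≠ [] := by
      intro h; subst h; simp at hj1
    rw [PySem.List.pyRange_one_eq_nil (le_refl _)]
    simp only [List.foldl_nil, List.filter_nil, List.nil_append, List.zip, List.zipWith,
      List.map]
    have hlast : PySem.List.pyGetD cand (-1) 0 = PySem.List.pyGetD cand ((cand.length : Int) - 1) 0 := by
      rw [PySem.List.pyGetD_neg_one cand 0 hne,
          PySem.List.pyGetD_eq_getElem cand 0 (by omega) (by omega)]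
      rw [List.getLast_eq_getElem]
      congr 1
      omega
    simp [pvCmd, hlast]
  | succ m ih =>
    have hjlt : j < (cand.length : Int) := by omega
    rw [PySem.List.pyRange_one_cons hjlt]
    simp only [List.foldl_cons, List.filter_cons]
    by_cases hgap : PySem.List.pyGetD cand j 0 - PySem.List.pyGetD cand (j - 1) 0 > 1
    · -- gap at j: A emits the run (i, j) and restarts at index j; j is a cut for B
      have hstepA : pvStepA cand (i, cmds) j =
          (j, cmds ++ [pvCmd cand (i, j)]) := by
        simp [pvStepA, pvCmd, hgap]
      rw [hstepA]
      have hrec := ih j (j + 1) (cmds ++ [pvCmd cand (i, j)])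
        (by omega) (by omega) (by omega) (by omega) (by omega)
      simp only [add_sub_cancel_right] at hrec
      rw [hrec]
      simp [hgap, List.zip, List.zipWith, List.append_assoc]
    · -- no gap: A keeps index i; j is not a cut for B
      have hstepA : pvStepA cand (i, cmds) j = (i, cmds) := by
        simp [pvStepA, hgap]
      rw [hstepA]
      have hrec := ih i (j + 1) cmds (by omega) (by omega) (by omega) (by omega) (by omega)
      simp only [add_sub_cancel_right] at hrec
      rw [hrec]
      simp [hgap]

-- ===== VERDICT (by name: the statement is the Claim_ definition above) =====
theorem split_erase_commands_py_spec : Claim_equal_split_erase_commands_py := by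
  intro cand _hdom hpre
  unfold Spec_split_erase_commands_py
  match cand, hpre with
  | [], _ => rfl
  | c :: rest, hpre =>
    have hrest : rest ≠ [] := by
      intro h; subst h; exact hpre rfl
    have hlen2 : 2 ≤ ((c :: rest).length : Int) := by
      cases rest with
      | nil => exact absurd rfl hrest
      | cons a t => simp; omega
    unfold split_erase_commands_py split_erase_commands_py_alt
    rw [if_neg (by simp), if_neg (by simp; omega), if_neg (by simp)]
    have := pvFold_eq (c :: rest) (((c :: rest).length : Int) - 1).toNat 0 1 []
      (le_refl 0) (by omega) (le_refl 1) (by omega) rfl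
    simp only at this
    rw [this]
    simp
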